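-- pv_equiv track=rewrite | github.com/LuisMIguelFurlanettoSousa/Beecrowd | Python/3-STRINGS/1024.py | criptogrfia
-- ===== SOURCE A (Python) =====
-- def criptogrfia(frase):
--     def primeira(f):
--         frase_separada = list(f)
--         frase_ascii_separada = []
--
--         offset = 3
--
--         for i in frase_separada:
--             if i.islower() or i.isupper():
--                 frase_ascii_separada.append(chr(ord(i) + offset))
--             else:
--                 frase_ascii_separada.append(i)
--
--         return ''.join(frase_ascii_separada)
--
--     def segunda(f):
--         return f[::-1]
--
--     def terceira(f):
--         frase_separada = list(f)
--         seguda_metade = len(frase_separada) // 2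
--         frase_ascii_separada = []
--         metade = []
--
--         offset = 1
--
--         for i in frase_separada:
--             frase_ascii_separada.append(chr(ord(i)))
--
--         for l in range(len(frase_separada)):
--             if l >= seguda_metade:
--                 metade.append(chr(ord(frase_separada[l]) - offset))
--
--
--         return "".join(frase_separada[:seguda_metade] + metade)
--
--     resultado = primeira(frase)
--     resultado = segunda(resultado)
--     resultado = terceira(resultado)
--
--     return resultado
-- ===== SOURCE B (Python) =====
-- def criptogrfia(frase):
--     n = len(frase)
--     half = n // 2
--     out = []
--     for j in range(n):
--         c = frase[n - 1 - j]
--         v = ord(c) + 3 if (c.islower() or c.isupper()) else ord(c)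
--         if j >= half:
--             v -= 1
--         out.append(chr(v))
--     return ''.join(out)
-- ===== Notes on version B (the rewrite author's own statement) =====
-- stated objective: simpler
-- what changed: Replaces A's three helper passes (shift, build reversed string, split/rebuild halves) with a single loop over output positions that reads the source right-to-left by index and applies the shift and the second-half decrement inline.
import Mathlib
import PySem

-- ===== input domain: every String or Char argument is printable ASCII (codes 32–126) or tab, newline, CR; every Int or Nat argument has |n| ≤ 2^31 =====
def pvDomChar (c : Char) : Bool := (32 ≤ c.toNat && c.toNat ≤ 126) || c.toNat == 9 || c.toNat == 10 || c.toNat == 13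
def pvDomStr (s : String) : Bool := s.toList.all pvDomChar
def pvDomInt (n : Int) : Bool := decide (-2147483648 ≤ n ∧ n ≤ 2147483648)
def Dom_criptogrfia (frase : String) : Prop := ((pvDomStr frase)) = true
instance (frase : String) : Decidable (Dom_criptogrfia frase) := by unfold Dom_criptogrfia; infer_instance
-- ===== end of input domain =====

-- B fuses A's three passes (letter shift, reversal, second-half decrement) into one
-- index-driven loop over output positions; objective: simpler, same O(n) cost.

-- ===== PORT A =====
-- primeira: append chr(ord(i)+3) for letters, i otherwise
def pvPrimeira (f : List Char) : List Char :=
  f.foldl (fun acc i =>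
    if PySem.Chars.islower i || PySem.Chars.isupper i then acc ++ [Char.ofNat (i.toNat + 3)]
    else acc ++ [i]) []

-- terceira: frase_separada[:half] ++ metade; the loop over range(len) appends
-- chr(ord(frase_separada[l]) - 1) when l >= half.  (The first loop of the Python,
-- which builds a list that is never used, is value-irrelevant and omitted.)
-- ord(x)-1 as Nat subtraction: exact for char codes ≥ 1, which Dom guarantees.
def pvTerceira (f : List Char) : List Char :=
  let half := f.length / 2
  let metade := (List.range f.length).foldl (fun acc l =>
    if half ≤ l then acc ++ [Char.ofNat ((f.getD l ' ').toNat - 1)] else acc) []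
  f.take half ++ metade

def criptogrfia (frase : String) : String :=
  let resultado1 := pvPrimeira frase.toList
  let resultado2 := resultado1.reverse   -- f[::-1] (PySem.List.slice?_none_none_neg_one)
  String.ofList (pvTerceira resultado2)

-- ===== PORT B =====
-- one pass over output positions j, reading the source right-to-left by index
-- (frase[n-1-j] is always in range, so getD's default is never used)
def criptogrfia_alt (frase : String) : String :=
  let cs := frase.toList
  let n := cs.length
  let half := n / 2
  String.ofList ((List.range n).map (fun j =>
    let c := cs.getD (n - 1 - j) ' '
    let v := if PySem.Chars.islower c || PySem.Chars.isupper c then c.toNat + 3 else c.toNat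
    Char.ofNat (if half ≤ j then v - 1 else v)))

-- ===== PRECONDITION & SPEC =====
def Spec_criptogrfia (frase : String) (out : String) : Prop := out = criptogrfia_alt frase
instance (frase : String) (out : String) : Decidable (Spec_criptogrfia frase out) := by unfold Spec_criptogrfia; infer_instance

-- ===== CLAIM (what is proved, stated in full; the proofs are below) =====
def Claim_equal_criptogrfia : Prop := ∀ (frase : String), Dom_criptogrfia frase → Spec_criptogrfia frase (criptogrfia frase)

-- ===== LEMMAS AND PROOFS =====

-- the letter-shift of a single character, as A computes it
def pvShiftC (i : Char) : Char :=
  if PySem.Chars.islower i || PySem.Chars.isupper i then Char.ofNat (i.toNat + 3) else i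

theorem pvPrimeira_eq_map (f : List Char) : pvPrimeira f = f.map pvShiftC := by
  have h : ∀ (acc : List Char), f.foldl (fun acc i =>
      if PySem.Chars.islower i || PySem.Chars.isupper i then acc ++ [Char.ofNat (i.toNat + 3)]
      else acc ++ [i]) acc = acc ++ f.map pvShiftC := by
    induction f with
    | nil => simp
    | cons x xs ih =>
      intro acc
      simp only [List.foldl_cons, List.map_cons, pvShiftC]
      split <;> rw [ih] <;> simp
  unfold pvPrimeira
  simpa only [List.nil_append] using h []

theorem pvMetadeLoop (m half : Nat) (g : Nat → Char) (A : List Char) :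
    (List.range m).foldl (fun acc l => if half ≤ l then acc ++ [g l] else acc) A
      = A ++ ((List.range m).filter (fun l => half ≤ l)).map g := by
  induction m generalizing A with
  | zero => simp
  | succ k ih =>
    rw [List.range_succ]
    simp only [List.foldl_append, List.foldl_cons, List.foldl_nil, List.filter_append,
      List.map_append, ih]
    by_cases h : half ≤ k <;> simp [h]

theorem pvFilterRange (half m : Nat) :
    ((List.range (half + m)).filter (fun l => half ≤ l)) = (List.range m).map (half + ·) := by
  rw [List.range_add, List.filter_append]
  have h1 : (List.range half).filter (fun l => decide (half ≤ l)) = [] := by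
    apply List.filter_eq_nil_iff.mpr
    intro a ha
    simp only [List.mem_range] at ha
    simp only [decide_eq_true_eq]
    omega
  have h2 : ((List.range m).map (half + ·)).filter (fun l => decide (half ≤ l))
      = (List.range m).map (half + ·) := by
    apply List.filter_eq_self.mpr
    intro a ha
    simp only [List.mem_map] at ha
    obtain ⟨b, _, rfl⟩ := ha
    simp
  rw [h1, h2, List.nil_append]

theorem pvTakeRange (r : List Char) (k : Nat) (hk : k ≤ r.length) (d : Char) :
    (List.range k).map (fun j => r.getD j d) = r.take k := by
  apply List.ext_getElem
  · simp [hk]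
  · intro i h1 h2
    simp only [List.length_map, List.length_range] at h1
    simp only [List.getElem_map, List.getElem_range, List.getElem_take]
    rw [List.getD_eq_getElem _ _ (by omega)]

-- a character admitted by Dom has code ≤ 126, so ord+3 round-trips through chr
theorem pvShiftC_toNat (c : Char) (hc : c.toNat ≤ 126) :
    (pvShiftC c).toNat
      = (if PySem.Chars.islower c || PySem.Chars.isupper c then c.toNat + 3 else c.toNat) := by
  unfold pvShiftC
  split
  · rw [Char.toNat_ofNat, if_pos (Or.inl (by omega : c.toNat + 3 < 55296))]
  · rfl

theorem pvFilterRange' (half n : Nat) (h : half ≤ n) :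
    ((List.range n).filter (fun l => half ≤ l)) = (List.range (n - half)).map (half + ·) := by
  have := pvFilterRange half (n - half)
  rwa [Nat.add_sub_cancel' h] at this

theorem criptogrfia_spec' (frase : String) (hd : Dom_criptogrfia frase) :
    criptogrfia frase = criptogrfia_alt frase := by
  unfold criptogrfia criptogrfia_alt pvTerceira
  dsimp only
  rw [pvPrimeira_eq_map]
  set f := frase.toList with hf
  have hdom : ∀ c ∈ f, c.toNat ≤ 126 := by
    intro c hc
    have := List.all_eq_true.mp hd c hc
    simp [pvDomChar] at this
    omega
  set r : List Char := (f.map pvShiftC).reverse with hr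
  have hn : r.length = f.length := by simp [hr]
  rw [pvMetadeLoop, List.nil_append, hn]
  set n := f.length with hnn
  set half := n / 2 with hhalf
  have hhn : half ≤ n := Nat.div_le_self _ _
  rw [pvFilterRange' half n hhn]
  rw [show (List.range n) = List.range half ++ (List.range (n - half)).map (half + ·) from by
    rw [← List.range_add, Nat.add_sub_cancel' hhn]]
  rw [List.map_append, List.map_map, List.map_map]
  congr 1
  congr 1
  · -- first half: take half r = shifted chars read backwards, codes re-encoded by chr(ord(.))
    rw [← pvTakeRange r half (by omega) ' ']
    apply List.map_congr_left
    intro j hj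
    simp only [List.mem_range] at hj
    have hjn : j < n := by omega
    have hnot : ¬ half ≤ j := by omega
    rw [if_neg hnot]
    have hjr : j < r.length := by omega
    rw [List.getD_eq_getElem _ _ hjr, List.getD_eq_getElem _ _ (by omega : n - 1 - j < f.length)]
    simp only [hr, List.getElem_reverse, List.getElem_map, List.length_map, ← hnn]
    have hc : f[n - 1 - j].toNat ≤ 126 := hdom _ (List.getElem_mem _)
    rw [← pvShiftC_toNat _ hc, Char.ofNat_toNat]
  · -- second half: both sides subtract one from the shifted code
    apply List.map_congr_left
    intro j hj
    simp only [List.mem_range] at hj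
    have hjn : half + j < n := by omega
    have hyes : half ≤ half + j := by omega
    simp only [Function.comp_apply]
    rw [if_pos hyes]
    have hjr : half + j < r.length := by omega
    rw [List.getD_eq_getElem _ _ hjr,
      List.getD_eq_getElem _ _ (by omega : n - 1 - (half + j) < f.length)]
    simp only [hr, List.getElem_reverse, List.getElem_map, List.length_map, ← hnn]
    have hc : f[n - 1 - (half + j)].toNat ≤ 126 := hdom _ (List.getElem_mem _)
    rw [← pvShiftC_toNat _ hc]

-- ===== VERDICT (by name: the statement is the Claim_ definition above) =====
theorem criptogrfia_spec : Claim_equal_criptogrfia := by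
  intro frase hd
  unfold Spec_criptogrfia
  exact criptogrfia_spec' frase hd
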